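-- pv_equiv track=rewrite | github.com/SC2079-MDP-Group-31/MDP-Algo | simulation.py | _check_button_hover
-- ===== SOURCE A (Python) =====
-- def _check_button_hover(mouse_x, mouse_y):
--     """Check which button is being hovered over"""
--     button_width = 140
--     button_height = 45
--     button_x = 630
--     button_spacing = 60
--
--     # Check main control buttons
--     buttons = [
--         ("start", button_x, 300),
--         ("reset", button_x, 300 + button_spacing),
--         ("draw_path", button_x, 300 + button_spacing * 2)
--     ]
--
--     for button_name, x, y in buttons:
--         if (x <= mouse_x <= x + button_width and y <= mouse_y <= y + button_height):
--             return button_name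
--
--     return None
-- ===== SOURCE B (Python) =====
-- def _check_button_hover(mouse_x, mouse_y):
--     """Check which button is being hovered over (arithmetic hit test on the uniform grid)"""
--     if not (630 <= mouse_x <= 770):
--         return None
--     row, rem = divmod(mouse_y - 300, 60)
--     if 0 <= row <= 2 and rem <= 45:
--         return ["start", "reset", "draw_path"][row]
--     return None
-- ===== Notes on version B (the rewrite author's own statement) =====
-- stated objective: alternative
-- what changed: Replaces the per-button bounding-box loop with a direct arithmetic hit test: one shared x-range check plus divmod on (mouse_y-300) over the uniform 60px grid.
import Mathlib
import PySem

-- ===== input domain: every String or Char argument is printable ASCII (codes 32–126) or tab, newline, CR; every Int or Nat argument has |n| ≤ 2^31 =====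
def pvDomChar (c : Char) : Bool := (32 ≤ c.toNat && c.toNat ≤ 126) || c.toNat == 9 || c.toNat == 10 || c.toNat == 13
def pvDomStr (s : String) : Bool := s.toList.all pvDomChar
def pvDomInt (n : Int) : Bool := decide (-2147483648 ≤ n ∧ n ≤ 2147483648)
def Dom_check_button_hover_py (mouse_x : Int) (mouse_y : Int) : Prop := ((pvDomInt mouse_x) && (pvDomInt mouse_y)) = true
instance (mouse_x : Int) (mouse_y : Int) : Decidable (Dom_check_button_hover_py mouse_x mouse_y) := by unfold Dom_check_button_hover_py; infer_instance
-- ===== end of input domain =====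

-- B replaces A's per-button loop by a single arithmetic hit test (same values everywhere).

-- ===== PORT A =====
-- the 'for button_name, x, y in buttons' loop
def checkButtonsLoop (mouse_x mouse_y : Int) : List (String × Int × Int) → Option String
  | [] => none
  | (name, x, y) :: rest =>
      if x ≤ mouse_x ∧ mouse_x ≤ x + 140 ∧ y ≤ mouse_y ∧ mouse_y ≤ y + 45 then
        some name
      else checkButtonsLoop mouse_x mouse_y rest

def check_button_hover_py (mouse_x : Int) (mouse_y : Int) : Option String :=
  let button_x : Int := 630
  let button_spacing : Int := 60
  let buttons : List (String × Int × Int) :=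
    [("start", button_x, 300),
     ("reset", button_x, 300 + button_spacing),
     ("draw_path", button_x, 300 + button_spacing * 2)]
  checkButtonsLoop mouse_x mouse_y buttons

-- ===== PORT B =====
def check_button_hover_py_alt (mouse_x : Int) (mouse_y : Int) : Option String :=
  if ¬ (630 ≤ mouse_x ∧ mouse_x ≤ 770) then none
  else
    let row := PySem.Int.floordiv (mouse_y - 300) 60
    let rem := PySem.Int.mod (mouse_y - 300) 60
    if 0 ≤ row ∧ row ≤ 2 ∧ rem ≤ 45 then
      PySem.List.pyGet? ["start", "reset", "draw_path"] row
    else none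

-- ===== PRECONDITION & SPEC =====
def Spec_check_button_hover_py (mouse_x : Int) (mouse_y : Int) (out : Option String) : Prop := out = check_button_hover_py_alt mouse_x mouse_y
instance (mouse_x : Int) (mouse_y : Int) (out : Option String) : Decidable (Spec_check_button_hover_py mouse_x mouse_y out) := by unfold Spec_check_button_hover_py; infer_instance

-- ===== CLAIM (what is proved, stated in full; the proofs are below) =====
def Claim_equal_check_button_hover_py : Prop := ∀ (mouse_x : Int) (mouse_y : Int), Dom_check_button_hover_py mouse_x mouse_y → Spec_check_button_hover_py mouse_x mouse_y (check_button_hover_py mouse_x mouse_y)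

-- ===== LEMMAS AND PROOFS =====

-- ===== VERDICT (by name: the statement is the Claim_ definition above) =====
theorem check_button_hover_py_spec : Claim_equal_check_button_hover_py := by
  intro mx my _
  unfold Spec_check_button_hover_py check_button_hover_py check_button_hover_py_alt checkButtonsLoop
  have hd : PySem.Int.floordiv (my - 300) 60 = (my - 300) / 60 :=
    PySem.Int.floordiv_eq_ediv_of_pos (by norm_num)
  have hm : PySem.Int.mod (my - 300) 60 = (my - 300) % 60 :=
    PySem.Int.mod_eq_emod_of_pos (by norm_num)
  simp only [hd, hm]
  by_cases hx : 630 ≤ mx ∧ mx ≤ 770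
  · by_cases h0 : 300 ≤ my ∧ my ≤ 345
    · have hr : (my - 300) / 60 = 0 := by omega
      simp [hx, h0, hr, PySem.List.pyGet?, PySem.List.pyIdx?]
      omega
    · by_cases h1 : 360 ≤ my ∧ my ≤ 405
      · have hr : (my - 300) / 60 = 1 := by omega
        simp [checkButtonsLoop, hx, h0, h1, hr, PySem.List.pyGet?, PySem.List.pyIdx?]
        omega
      · by_cases h2 : 420 ≤ my ∧ my ≤ 465
        · have hr : (my - 300) / 60 = 2 := by omega
          simp [checkButtonsLoop, hx, h0, h1, h2, hr, PySem.List.pyGet?, PySem.List.pyIdx?]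
          omega
        · have : ¬ (0 ≤ (my - 300) / 60 ∧ (my - 300) / 60 ≤ 2 ∧ (my - 300) % 60 ≤ 45) := by
            omega
          simp [checkButtonsLoop, hx, h0, h1, h2, this]
  · simp [checkButtonsLoop, hx]
    split_ifs <;> tauto
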